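-- pv_equiv track=rewrite | github.com/hodokim/Coding-Interview-Preparation-2022 | 프로그래머스Lv3_베스트 앨범.py | solution
-- ===== SOURCE A (Python) =====
-- def solution(genres, plays):
--     answer = []
--
--     dic_1 = {}
--     dic_2 = {}
--
--     for idx, (g, p) in enumerate(zip(genres, plays)):
--         if g not in dic_1 :
--             dic_1[g] = p
--         else :
--             dic_1[g] += p
--
--         if g not in dic_2 :
--             dic_2[g] = [(idx, p)]
--         else :
--             dic_2[g].append((idx, p))
--
--     for(key, value) in sorted(dic_1.items(), key=lambda x:x[1], reverse=True) :
--         for(i, p) in sorted(dic_2[key], key=lambda x:x[1], reverse=True)[:3] :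
--             answer.append(i)
--
--     return answer
--
-- genres = ["classic", "pop", "classic", "classic", "pop"]
--
-- plays = [500, 600, 500, 800, 2500]
-- ===== SOURCE B (Python) =====
-- def solution(genres, plays):
--     totals = {}
--     first = {}
--     for i, (g, p) in enumerate(zip(genres, plays)):
--         totals[g] = totals.get(g, 0) + p
--         if g not in first:
--             first[g] = i
--     flat = [(g, i, p) for i, (g, p) in enumerate(zip(genres, plays))]
--     order = sorted(flat, key=lambda t: (-totals[t[0]], first[t[0]], -t[2], t[1]))
--     cnt = {}
--     answer = []
--     for g, i, p in order:
--         if cnt.get(g, 0) < 3: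
--             cnt[g] = cnt.get(g, 0) + 1
--             answer.append(i)
--     return answer
-- ===== Notes on version B (the rewrite author's own statement) =====
-- stated objective: alternative
-- what changed: A builds a genre->song-list dict and runs a separate reverse sort per genre inside the genre loop; B instead does one global sort of all (genre, index, plays) tuples under the composite key (-genre_total, first_seen_index, -plays, index) and then emits at most three indices per genre in a single counting pass.
import Mathlib
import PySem

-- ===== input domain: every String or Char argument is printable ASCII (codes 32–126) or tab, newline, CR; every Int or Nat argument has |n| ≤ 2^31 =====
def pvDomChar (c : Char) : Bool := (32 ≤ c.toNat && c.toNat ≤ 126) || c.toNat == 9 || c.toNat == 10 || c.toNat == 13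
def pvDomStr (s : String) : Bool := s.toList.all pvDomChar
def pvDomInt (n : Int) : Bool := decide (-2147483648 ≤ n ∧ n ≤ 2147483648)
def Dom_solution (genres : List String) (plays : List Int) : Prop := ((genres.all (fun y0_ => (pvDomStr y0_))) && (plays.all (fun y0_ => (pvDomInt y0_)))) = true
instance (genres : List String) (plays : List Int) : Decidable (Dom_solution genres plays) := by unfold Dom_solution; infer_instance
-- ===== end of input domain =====

-- B replaces A's per-genre dict of song lists and its nested sorts by ONE global sort under a
-- composite key (-total, first-seen, -plays, index) followed by a single counting pass (objective:
-- alternative — a genuinely different decomposition of the same task).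

-- ===== PORT A =====
def solution (genres : List String) (plays : List Int) : List Int :=
  let step := fun (ds : PySem.Dict String Int × PySem.Dict String (List (Int × Int))) (e : Int × String × Int) =>
    let d1 := if ds.1.contains e.2.1 = false then ds.1.insert e.2.1 e.2.2
              else ds.1.insert e.2.1 (ds.1.getD e.2.1 0 + e.2.2)
    let d2 := if ds.2.contains e.2.1 = false then ds.2.insert e.2.1 [(e.1, e.2.2)]
              else ds.2.insert e.2.1 (ds.2.getD e.2.1 [] ++ [(e.1, e.2.2)])
    (d1, d2)
  let ds := (PySem.List.enumerate (genres.zip plays)).foldl step (PySem.Dict.empty, PySem.Dict.empty)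
  (PySem.List.sorted ds.1.items (fun x => x.2) true).foldl (fun answer kv =>
    ((PySem.List.sorted (ds.2.getD kv.1 []) (fun x => x.2) true).take 3).foldl
      (fun a ip => a ++ [ip.1]) answer) []

-- ===== PORT B =====
def solution_alt (genres : List String) (plays : List Int) : List Int :=
  let E := PySem.List.enumerate (genres.zip plays)
  let tf := E.foldl (fun (tf : PySem.Dict String Int × PySem.Dict String Int) e =>
      (tf.1.insert e.2.1 (tf.1.getD e.2.1 0 + e.2.2),
       if tf.2.contains e.2.1 then tf.2 else tf.2.insert e.2.1 e.1)) (PySem.Dict.empty, PySem.Dict.empty)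
  let flat := E.map (fun e => (e.2.1, e.1, e.2.2))
  -- totals[t[0]] / first[t[0]]: both keys are always present here, so getD is exact
  let key := fun t : String × Int × Int =>
    toLex (-(tf.1.getD t.1 0), toLex (tf.2.getD t.1 0, toLex (-t.2.2, t.2.1)))
  (((PySem.List.sorted flat key).foldl (fun (ca : PySem.Dict String Int × List Int) t =>
      if ca.1.getD t.1 0 < 3 then (ca.1.insert t.1 (ca.1.getD t.1 0 + 1), ca.2 ++ [t.2.1]) else ca)
    (PySem.Dict.empty, []))).2

-- ===== PRECONDITION & SPEC =====
def Spec_solution (genres : List String) (plays : List Int) (out : List Int) : Prop := out = solution_alt genres plays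
instance (genres : List String) (plays : List Int) (out : List Int) : Decidable (Spec_solution genres plays out) := by unfold Spec_solution; infer_instance

-- ===== CLAIM (what is proved, stated in full; the proofs are below) =====
def Claim_equal_solution : Prop := ∀ (genres : List String) (plays : List Int), Dom_solution genres plays → Spec_solution genres plays (solution genres plays)

-- ===== LEMMAS AND PROOFS =====

-- proof-side abbreviations over the enumerated song list E : List (index × genre × plays)
def pvTg (E : List (Int × String × Int)) (g : String) : Int :=
  ((E.filter (fun e => e.2.1 == g)).map (fun e => e.2.2)).sum
def pvGrp (E : List (Int × String × Int)) (g : String) : List (Int × Int) :=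
  (E.filter (fun e => e.2.1 == g)).map (fun e => (e.1, e.2.2))
def pvD1 (E : List (Int × String × Int)) (d : PySem.Dict String Int) : PySem.Dict String Int :=
  E.foldl (fun d e => d.insert e.2.1 (d.getD e.2.1 0 + e.2.2)) d
def pvD2 (E : List (Int × String × Int)) (d : PySem.Dict String (List (Int × Int))) :
    PySem.Dict String (List (Int × Int)) :=
  E.foldl (fun d e => d.insert e.2.1 (d.getD e.2.1 [] ++ [(e.1, e.2.2)])) d
def pvFF (E : List (Int × String × Int)) (d : PySem.Dict String Int) : PySem.Dict String Int :=
  E.foldl (fun d e => if d.contains e.2.1 then d else d.insert e.2.1 e.1) d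
def pvFs (E : List (Int × String × Int)) (g : String) : Int := (pvFF E PySem.Dict.empty).getD g 0
def pvKg (E : List (Int × String × Int)) : String × Int → Int ×ₗ Int :=
  fun kv => toLex (-(pvTg E kv.1), pvFs E kv.1)
def pvKb (E : List (Int × String × Int)) : String × Int × Int → Int ×ₗ (Int ×ₗ (Int ×ₗ Int)) :=
  fun t => toLex (-(pvTg E t.1), toLex (pvFs E t.1, toLex (-t.2.2, t.2.1)))
def pvSG (E : List (Int × String × Int)) : List (String × Int) :=
  PySem.List.sorted (pvD1 E PySem.Dict.empty).items (fun x => x.2) true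
def pvBlk (E : List (Int × String × Int)) (g : String) : List (String × Int × Int) :=
  (PySem.List.sorted (pvGrp E g) (fun x => x.2) true).map (fun ip => (g, ip.1, ip.2))
def pvCStep : PySem.Dict String Int × List Int → String × Int × Int → PySem.Dict String Int × List Int :=
  fun ca t => if ca.1.getD t.1 0 < 3 then (ca.1.insert t.1 (ca.1.getD t.1 0 + 1), ca.2 ++ [t.2.1]) else ca

-- a fold over a pair whose components evolve independently splits
theorem pv_foldl_pair_split {γ A B : Type} (E : List γ) (f1 : A → γ → A) (f2 : B → γ → B)
    (a : A) (b : B) :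
    E.foldl (fun ds e => (f1 ds.1 e, f2 ds.2 e)) (a, b) = (E.foldl f1 a, E.foldl f2 b) := by
  induction E generalizing a b with
  | nil => rfl
  | cons e E ih => simpa using ih (f1 a e) (f2 b e)

theorem pv_getD_pvD1 (E : List (Int × String × Int)) (d : PySem.Dict String Int) (g : String) :
    (pvD1 E d).getD g 0 = d.getD g 0 + pvTg E g := by
  induction E generalizing d with
  | nil => simp [pvD1, pvTg]
  | cons e E ih =>
    have hstep : pvD1 (e :: E) d = pvD1 E (d.insert e.2.1 (d.getD e.2.1 0 + e.2.2)) := rfl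
    rw [hstep, ih]
    by_cases h : g = e.2.1
    · subst h
      simp [pvTg, PySem.Dict.getD_insert]
      omega
    · simp [pvTg, List.filter_cons, PySem.Dict.getD_insert, h, Ne.symm h]

theorem pv_keys_pvD1 (E : List (Int × String × Int)) :
    (pvD1 E PySem.Dict.empty).keys = PySem.Set.ofList (E.map (fun e => e.2.1)) := by
  have := PySem.Dict.keys_foldl_insert_key E (fun e => e.2.1)
      (fun d e => d.getD e.2.1 0 + e.2.2) (PySem.Dict.empty : PySem.Dict String Int)
  simpa [pvD1, PySem.Set.update, PySem.Set.ofList, PySem.Set.empty] using this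

theorem pv_nodup_keys_pvD1 (E : List (Int × String × Int)) :
    (pvD1 E PySem.Dict.empty).keys.Nodup := by
  exact PySem.Dict.nodup_keys_foldl_insert_key E (fun e => e.2.1) _ _ (by simp)

theorem pv_items_pvD1 (E : List (Int × String × Int)) :
    (pvD1 E PySem.Dict.empty).items
      = (pvD1 E PySem.Dict.empty).keys.map (fun g => (g, pvTg E g)) := by
  rw [PySem.Dict.items_eq_map_keys _ (pv_nodup_keys_pvD1 E) 0]
  refine List.map_congr_left (fun g hg => ?_)
  rw [pv_getD_pvD1]
  simp [PySem.Dict.getD_empty]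

theorem pv_getD_pvD2 (E : List (Int × String × Int)) (g : String) :
    (pvD2 E PySem.Dict.empty).getD g [] = pvGrp E g := by
  have hmap : pvD2 E PySem.Dict.empty
      = (E.map (fun e => (e.2.1, (e.1, e.2.2)))).foldl
          (fun d p => d.modify p.1 [] (fun x => x ++ [p.2])) PySem.Dict.empty := by
    rw [List.foldl_map]; rfl
  rw [hmap, PySem.Dict.getD_foldl_modify_append, List.filter_map]
  simp only [pvGrp, List.nil_append, List.map_map]
  rfl

-- the first-seen dict: keys in first-appearance order, values strictly increasing along items
theorem pv_ff_props (E : List (Int × String × Int)) (d : PySem.Dict String Int)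
    (hE : E.Pairwise (fun a b => a.1 < b.1)) (hnd : d.keys.Nodup)
    (hpw : d.items.Pairwise (fun a b => a.2 < b.2))
    (hblw : ∀ q ∈ d.items, ∀ e ∈ E, q.2 < e.1) :
    (pvFF E d).keys = PySem.Set.update d.keys (E.map (fun e => e.2.1)) ∧
    (pvFF E d).keys.Nodup ∧
    (pvFF E d).items.Pairwise (fun a b => a.2 < b.2) := by
  induction E generalizing d with
  | nil => exact ⟨rfl, hnd, hpw⟩
  | cons e E ih =>
    rw [List.pairwise_cons] at hE
    by_cases h : d.contains e.2.1
    · have hstep : pvFF (e :: E) d = pvFF E d := by simp [pvFF, h]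
      have hm : e.2.1 ∈ d.keys := (PySem.Dict.contains_iff_mem_keys d e.2.1).mp h
      have hc : d.keys.contains e.2.1 = true := by simpa [List.contains_iff_mem] using hm
      have hadd : PySem.Set.add d.keys e.2.1 = d.keys := by simp [PySem.Set.add, hm]
      have := ih (d := d) hE.2 hnd hpw (fun q hq e' he' => hblw q hq e' (List.mem_cons_of_mem _ he'))
      rw [hstep]
      refine ⟨?_, this.2.1, this.2.2⟩
      rw [this.1]
      simp [PySem.Set.update, hadd]
    · have h' : d.contains e.2.1 = false := by simpa using h
      have hstep : pvFF (e :: E) d = pvFF E (d.insert e.2.1 e.1) := by simp [pvFF, h]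
      have hitems : (d.insert e.2.1 e.1).items = d.items ++ [(e.2.1, e.1)] :=
        PySem.Dict.items_insert_of_not_contains d e.1 h'
      have hkeys : (d.insert e.2.1 e.1).keys = d.keys ++ [e.2.1] :=
        PySem.Dict.keys_insert_of_not_contains d e.1 h'
      have hm : e.2.1 ∉ d.keys := fun hc => by
        simp [(PySem.Dict.contains_iff_mem_keys d e.2.1).mpr hc] at h'
      have hc : d.keys.contains e.2.1 = false := by simpa [List.contains_iff_mem] using hm
      have hadd : PySem.Set.add d.keys e.2.1 = d.keys ++ [e.2.1] := by
        simp [PySem.Set.add, hm]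
      have hpw' : (d.insert e.2.1 e.1).items.Pairwise (fun a b => a.2 < b.2) := by
        rw [hitems, List.pairwise_append]
        exact ⟨hpw, by simp, fun q hq b hb => by
          simp at hb; subst hb; exact hblw q hq e (List.mem_cons_self)⟩
      have hblw' : ∀ q ∈ (d.insert e.2.1 e.1).items, ∀ e' ∈ E, q.2 < e'.1 := by
        intro q hq e' he'
        rw [hitems] at hq
        rcases List.mem_append.mp hq with hq | hq
        · exact hblw q hq e' (List.mem_cons_of_mem _ he')
        · simp at hq; subst hq; exact hE.1 e' he'
      have := ih (d := d.insert e.2.1 e.1) hE.2 (PySem.Dict.nodup_keys_insert d _ _ hnd) hpw' hblw'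
      rw [hstep]
      refine ⟨?_, this.2.1, this.2.2⟩
      rw [this.1, hkeys]
      simp [PySem.Set.update, hadd]

theorem pv_enum_ge (l : List (String × Int)) (k : Int) :
    ∀ b ∈ PySem.List.enumerate l k, k ≤ b.1 := by
  induction l generalizing k with
  | nil => simp [PySem.List.enumerate]
  | cons x l ih =>
    intro b hb
    rcases List.mem_cons.mp hb with h | h
    · subst h; simp
    · have := ih (k + 1) b h; omega

theorem pv_enum_pairwise (l : List (String × Int)) (k : Int) :
    (PySem.List.enumerate l k).Pairwise (fun a b => a.1 < b.1) := by
  induction l generalizing k with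
  | nil => exact List.Pairwise.nil
  | cons x l ih =>
    refine List.Pairwise.cons (fun b hb => ?_) (ih (k + 1))
    have := pv_enum_ge l (k + 1) b hb; simp; omega

-- stability of PySem's insertion sort, phrased through a strict refinement key K
theorem pv_insertBy_pairwise {α γ : Type} [LinearOrder γ] (before : α → α → Bool) (K : α → γ)
    (x : α) (acc : List α) (hacc : acc.Pairwise (fun a b => K a < K b))
    (hx : ∀ a ∈ acc, (before x a = true → K x < K a) ∧ (before x a = false → K a < K x)) :
    (PySem.List.insertBy before x acc).Pairwise (fun a b => K a < K b) := by
  induction acc with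
  | nil => simp [PySem.List.insertBy]
  | cons a acc ih =>
    rw [List.pairwise_cons] at hacc
    by_cases h : before x a = true
    · have hxa : K x < K a := (hx a List.mem_cons_self).1 h
      have : PySem.List.insertBy before x (a :: acc) = x :: a :: acc := by
        simp [PySem.List.insertBy, h]
      rw [this]
      refine List.Pairwise.cons (fun b hb => ?_) (List.pairwise_cons.mpr hacc)
      rcases List.mem_cons.mp hb with hb | hb
      · subst hb; exact hxa
      · exact lt_trans hxa (hacc.1 b hb)
    · have h' : before x a = false := by simpa using h
      have hax : K a < K x := (hx a List.mem_cons_self).2 h'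
      have : PySem.List.insertBy before x (a :: acc) = a :: PySem.List.insertBy before x acc := by
        simp [PySem.List.insertBy, h']
      rw [this]
      refine List.Pairwise.cons (fun b hb => ?_)
        (ih hacc.2 (fun a' ha' => hx a' (List.mem_cons_of_mem _ ha')))
      rcases (PySem.List.mem_insertBy before x b acc).mp hb with hb | hb
      · subst hb; exact hax
      · exact hacc.1 b hb

theorem pv_foldl_insertBy_pairwise {α γ : Type} [LinearOrder γ] (before : α → α → Bool) (K : α → γ)
    (xs : List α) :
    ∀ (acc : List α), acc.Pairwise (fun a b => K a < K b) →
    (∀ x ∈ xs, ∀ a ∈ acc, (before x a = true → K x < K a) ∧ (before x a = false → K a < K x)) →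
    xs.Pairwise (fun y x => (before x y = true → K x < K y) ∧ (before x y = false → K y < K x)) →
    (xs.foldl (fun acc x => PySem.List.insertBy before x acc) acc).Pairwise (fun a b => K a < K b) := by
  induction xs with
  | nil => intro acc hacc _ _; exact hacc
  | cons x xs ih =>
    intro acc hacc hcross hxs
    rw [List.pairwise_cons] at hxs
    rw [List.foldl_cons]
    refine ih (PySem.List.insertBy before x acc)
      (pv_insertBy_pairwise before K x acc hacc (hcross x List.mem_cons_self)) ?_ hxs.2
    intro y hy a ha
    rcases (PySem.List.mem_insertBy before x a acc).mp ha with ha | ha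
    · subst ha; exact hxs.1 y hy
    · exact hcross y (List.mem_cons_of_mem _ hy) a ha

theorem pv_sorted_rev_pairwise_refine {α β γ : Type} [LinearOrder β] [LinearOrder γ]
    (xs : List α) (key : α → β) (K : α → γ)
    (h : xs.Pairwise (fun y x => (key y < key x → K x < K y) ∧ (¬ key y < key x → K y < K x))) :
    (PySem.List.sorted xs key true).Pairwise (fun a b => K a < K b) := by
  rw [PySem.List.sorted_rev_eq_foldl_insertBy]
  refine pv_foldl_insertBy_pairwise _ K xs [] List.Pairwise.nil (by simp) ?_
  refine h.imp (fun {y x} hyx => ?_)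
  constructor
  · intro hb; exact hyx.1 (by simpa using hb)
  · intro hb; exact hyx.2 (by simpa using hb)

-- grouping by a nodup list of keys that covers the list is a permutation
theorem pv_group_perm (flat : List (String × Int × Int)) (gs : List String) (hnd : gs.Nodup)
    (hmem : ∀ t ∈ flat, t.1 ∈ gs) :
    (gs.flatMap (fun g => flat.filter (fun t => t.1 == g))).Perm flat := by
  rw [List.perm_iff_count]
  intro t
  rw [List.count_flatMap]
  by_cases ht : t ∈ flat
  · have hg : t.1 ∈ gs := hmem t ht
    clear hmem
    induction gs with
    | nil => simp at hg
    | cons g gs ih =>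
      rw [List.nodup_cons] at hnd
      by_cases hgt : g = t.1
      · subst hgt
        have hzero : ∀ g' ∈ gs, List.count t (flat.filter (fun t' => t'.1 == g')) = 0 := by
          intro g' hg'
          have hne : t.1 ≠ g' := fun hEq => hnd.1 (hEq ▸ hg')
          rw [List.count_eq_zero]
          intro hc
          rw [List.mem_filter] at hc
          exact hne (by simpa using hc.2)
        have hsum : ((gs.map (List.count t ∘ fun g => flat.filter (fun t' => t'.1 == g))).sum) = 0 := by
          apply List.sum_eq_zero
          intro x hx
          rcases List.mem_map.mp hx with ⟨g', hg', rfl⟩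
          exact hzero g' hg'
        simp only [List.map_cons, List.sum_cons, hsum, Nat.add_zero, Function.comp]
        rw [List.count_filter (by simp)]
      · have hg' : t.1 ∈ gs := by
          rcases List.mem_cons.mp hg with h | h
          · exact absurd h.symm hgt
          · exact h
        have := ih hnd.2 hg'
        simp only [List.map_cons, List.sum_cons, Function.comp] at this ⊢
        rw [this]
        have : List.count t (flat.filter (fun t' => t'.1 == g)) = 0 := by
          rw [List.count_eq_zero]
          intro hc
          rw [List.mem_filter] at hc
          have h2 : t.1 = g := by simpa using hc.2
          exact hgt h2.symm
        omega
  · have h0 : List.count t flat = 0 := List.count_eq_zero.mpr ht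
    rw [h0]
    apply List.sum_eq_zero
    intro x hx
    rcases List.mem_map.mp hx with ⟨g', _, rfl⟩
    have := List.Sublist.count_le t (List.filter_sublist (p := fun t' => t'.1 == g') (l := flat))
    simp only [Function.comp]
    omega

-- the counting pass over one genre block
theorem pv_count_block (blk : List (String × Int × Int)) (g : String) :
    ∀ (cnt : PySem.Dict String Int) (ans : List Int) (k : Nat),
    (∀ t ∈ blk, t.1 = g) → cnt.getD g 0 = (k : Int) →
    (blk.foldl pvCStep (cnt, ans)).2 = ans ++ (blk.take (3 - k)).map (fun t => t.2.1) ∧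
    (∀ g', g' ≠ g → (blk.foldl pvCStep (cnt, ans)).1.getD g' 0 = cnt.getD g' 0) := by
  induction blk with
  | nil => intro cnt ans k _ _; simp
  | cons t blk ih =>
    intro cnt ans k hall hk
    have htg : t.1 = g := hall t List.mem_cons_self
    have hall' : ∀ t' ∈ blk, t'.1 = g := fun t' h => hall t' (List.mem_cons_of_mem _ h)
    by_cases hlt : k < 3
    · have hcond : cnt.getD t.1 0 < 3 := by rw [htg, hk]; exact_mod_cast hlt
      have hstep : (t :: blk).foldl pvCStep (cnt, ans)
          = blk.foldl pvCStep (cnt.insert t.1 (cnt.getD t.1 0 + 1), ans ++ [t.2.1]) := by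
        simp [pvCStep, hcond]
      have hk' : (cnt.insert t.1 (cnt.getD t.1 0 + 1)).getD g 0 = ((k + 1 : Nat) : Int) := by
        rw [htg, PySem.Dict.getD_insert]
        simp [hk]
      have := ih (cnt.insert t.1 (cnt.getD t.1 0 + 1)) (ans ++ [t.2.1]) (k + 1) hall' hk'
      rw [hstep]
      constructor
      · rw [this.1]
        have : 3 - k = (3 - (k + 1)) + 1 := by omega
        rw [this]
        simp
      · intro g' hg'
        rw [this.2 g' hg', PySem.Dict.getD_insert, if_neg (htg ▸ hg')]
    · have hcond : ¬ cnt.getD t.1 0 < 3 := by rw [htg, hk]; omega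
      have hstep : (t :: blk).foldl pvCStep (cnt, ans) = blk.foldl pvCStep (cnt, ans) := by
        simp [pvCStep, hcond]
      have := ih cnt ans k hall' hk
      rw [hstep]
      constructor
      · rw [this.1]
        have h30 : 3 - k = 0 := by omega
        simp [h30]
      · exact this.2

theorem pv_count_blocks (E : List (Int × String × Int)) (sg : List (String × Int)) :
    ∀ (cnt : PySem.Dict String Int) (ans : List Int),
    (sg.map (fun kv => kv.1)).Nodup → (∀ kv ∈ sg, cnt.getD kv.1 0 = 0) →
    ((sg.flatMap (fun kv => pvBlk E kv.1)).foldl pvCStep (cnt, ans)).2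
      = ans ++ sg.flatMap (fun kv => ((pvBlk E kv.1).take 3).map (fun t => t.2.1)) := by
  induction sg with
  | nil => intro cnt ans _ _; simp
  | cons kv sg ih =>
    intro cnt ans hnd h0
    rw [List.map_cons, List.nodup_cons] at hnd
    rw [List.flatMap_cons, List.foldl_append]
    have hall : ∀ t ∈ pvBlk E kv.1, t.1 = kv.1 := by
      intro t ht
      rcases List.mem_map.mp ht with ⟨ip, _, rfl⟩
      rfl
    have hblk := pv_count_block (pvBlk E kv.1) kv.1 cnt ans 0 hall
      (by exact_mod_cast h0 kv List.mem_cons_self)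
    have hres : (pvBlk E kv.1).foldl pvCStep (cnt, ans)
        = (((pvBlk E kv.1).foldl pvCStep (cnt, ans)).1,
           ans ++ ((pvBlk E kv.1).take (3 - 0)).map (fun t => t.2.1)) := by
      rw [← hblk.1]
    rw [hres]
    have h0' : ∀ kv' ∈ sg, ((pvBlk E kv.1).foldl pvCStep (cnt, ans)).1.getD kv'.1 0 = 0 := by
      intro kv' hkv'
      have hne : kv'.1 ≠ kv.1 := fun hEq => hnd.1 (hEq ▸ (List.mem_map.mpr ⟨kv', hkv', rfl⟩))
      rw [hblk.2 kv'.1 hne]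
      exact h0 kv' (List.mem_cons_of_mem _ hkv')
    rw [ih _ _ hnd.2 h0']
    simp

-- lex-order helpers for the composite key
theorem pv_lex_tail {a b : Int} {c c' : Int ×ₗ Int} (h : c < c') :
    toLex (a, toLex (b, c)) < toLex (a, toLex (b, c')) := by
  rw [Prod.Lex.toLex_lt_toLex]
  exact Or.inr ⟨rfl, by rw [Prod.Lex.toLex_lt_toLex]; exact Or.inr ⟨rfl, h⟩⟩

theorem pv_lex_prefix {a a' b b' : Int} {c c' : Int ×ₗ Int}
    (h : (toLex (a, b) : Int ×ₗ Int) < toLex (a', b')) :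
    toLex (a, toLex (b, c)) < toLex (a', toLex (b', c')) := by
  rw [Prod.Lex.toLex_lt_toLex] at h ⊢
  rcases h with h | ⟨h1, h2⟩
  · exact Or.inl h
  · exact Or.inr ⟨h1, by rw [Prod.Lex.toLex_lt_toLex]; exact Or.inl h2⟩

-- genres in first-appearance order carry strictly increasing first-seen indices
theorem pv_keys_fs_pairwise (E : List (Int × String × Int))
    (hE : E.Pairwise (fun a b => a.1 < b.1)) :
    (pvD1 E PySem.Dict.empty).keys.Pairwise (fun g1 g2 => pvFs E g1 < pvFs E g2) := by
  have F := pv_ff_props E PySem.Dict.empty hE (by simp)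
    (List.Pairwise.nil) (fun q hq => absurd hq (List.not_mem_nil))
  have hkeys : (pvFF E PySem.Dict.empty).keys = (pvD1 E PySem.Dict.empty).keys := by
    rw [F.1, pv_keys_pvD1]
    simp [PySem.Set.update, PySem.Set.ofList, PySem.Set.empty, PySem.Dict.keys_empty]
  have hitems := PySem.Dict.items_eq_map_keys (pvFF E PySem.Dict.empty) F.2.1 0
  have hpw := F.2.2
  rw [hitems, List.pairwise_map] at hpw
  rw [← hkeys]
  exact hpw.imp (fun {g1 g2} h => h)

-- the genre pass of A is strictly increasing under the composite genre key
theorem pv_sg_pairwise (E : List (Int × String × Int))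
    (hE : E.Pairwise (fun a b => a.1 < b.1)) :
    (pvSG E).Pairwise (fun kv1 kv2 => pvKg E kv1 < pvKg E kv2) := by
  refine pv_sorted_rev_pairwise_refine _ (fun x => x.2) (pvKg E) ?_
  rw [pv_items_pvD1, List.pairwise_map]
  refine (pv_keys_fs_pairwise E hE).imp (fun {g1 g2} hfs => ?_)
  constructor
  · intro hT
    dsimp only at hT
    exact Prod.Lex.toLex_lt_toLex.mpr (Or.inl (by simp; omega))
  · intro hT
    dsimp only at hT
    rcases lt_or_eq_of_le (le_of_not_gt hT) with h | h
    · exact Prod.Lex.toLex_lt_toLex.mpr (Or.inl (by simp; omega))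
    · exact Prod.Lex.toLex_lt_toLex.mpr (Or.inr ⟨by simp [h], hfs⟩)

-- the per-genre pass of A is strictly increasing under (-plays, index)
theorem pv_blk_pairwise (E : List (Int × String × Int))
    (hE : E.Pairwise (fun a b => a.1 < b.1)) (g : String) :
    (pvBlk E g).Pairwise (fun x y => pvKb E x < pvKb E y) := by
  rw [pvBlk, List.pairwise_map]
  have hgrp : (pvGrp E g).Pairwise (fun a b => a.1 < b.1) := by
    rw [pvGrp, List.pairwise_map]
    exact (List.Pairwise.sublist List.filter_sublist hE).imp (fun {a b} h => h)
  have hs := pv_sorted_rev_pairwise_refine (pvGrp E g) (fun x => x.2)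
    (fun ip : Int × Int => (toLex (-ip.2, ip.1) : Int ×ₗ Int)) ?_
  · refine hs.imp (fun {ip1 ip2} h => ?_)
    exact pv_lex_tail h
  · refine hgrp.imp (fun {ip1 ip2} hi => ?_)
    constructor
    · intro hp
      dsimp only at hp
      exact Prod.Lex.toLex_lt_toLex.mpr (Or.inl (by simp; omega))
    · intro hp
      dsimp only at hp
      rcases lt_or_eq_of_le (le_of_not_gt hp) with h | h
      · exact Prod.Lex.toLex_lt_toLex.mpr (Or.inl (by simp; omega))
      · exact Prod.Lex.toLex_lt_toLex.mpr (Or.inr ⟨by rw [h], hi⟩)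

-- THE central fact: B's single global sort is exactly A's genre blocks in order
theorem pv_order (E : List (Int × String × Int))
    (hE : E.Pairwise (fun a b => a.1 < b.1)) :
    PySem.List.sorted (E.map (fun e => (e.2.1, e.1, e.2.2))) (pvKb E)
      = (pvSG E).flatMap (fun kv => pvBlk E kv.1) := by
  have hblkeq : ∀ g : String, (pvGrp E g).map (fun ip => (g, ip.1, ip.2))
      = (E.map (fun e => (e.2.1, e.1, e.2.2))).filter (fun t => t.1 == g) := by
    intro g
    rw [List.filter_map]
    have : (fun (t : String × Int × Int) => t.1 == g) ∘ (fun e : Int × String × Int => (e.2.1, e.1, e.2.2))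
        = fun e : Int × String × Int => e.2.1 == g := rfl
    rw [this, pvGrp, List.map_map]
    refine List.map_congr_left (fun e he => ?_)
    have : e.2.1 = g := by simpa using (List.mem_filter.mp he).2
    simp [Function.comp, this]
  apply PySem.List.sorted_eq_of_perm_of_pairwise_lt
  · -- permutation
    have p1 : ∀ kv : String × Int, (pvBlk E kv.1).Perm
        ((E.map (fun e => (e.2.1, e.1, e.2.2))).filter (fun t => t.1 == kv.1)) := by
      intro kv
      rw [pvBlk, ← hblkeq kv.1]
      exact (PySem.List.sorted_perm (pvGrp E kv.1) (fun x => x.2) true).map _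
    have p2 : ((pvSG E).flatMap (fun kv => pvBlk E kv.1)).Perm
        ((pvSG E).flatMap (fun kv => (E.map (fun e => (e.2.1, e.1, e.2.2))).filter (fun t => t.1 == kv.1))) :=
      List.Perm.flatMap (List.Perm.refl _) (fun kv _ => p1 kv)
    have p3 : ((pvSG E).flatMap (fun kv => (E.map (fun e => (e.2.1, e.1, e.2.2))).filter (fun t => t.1 == kv.1))).Perm
        (((pvD1 E PySem.Dict.empty).items).flatMap (fun kv => (E.map (fun e => (e.2.1, e.1, e.2.2))).filter (fun t => t.1 == kv.1))) :=
      List.Perm.flatMap (PySem.List.sorted_perm _ _ _) (fun kv _ => List.Perm.refl _)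
    have p4 : ((pvD1 E PySem.Dict.empty).items).flatMap (fun kv => (E.map (fun e => (e.2.1, e.1, e.2.2))).filter (fun t => t.1 == kv.1))
        = ((pvD1 E PySem.Dict.empty).keys).flatMap (fun g => (E.map (fun e => (e.2.1, e.1, e.2.2))).filter (fun t => t.1 == g)) := by
      rw [pv_items_pvD1, List.flatMap_map]
    have p5 : (((pvD1 E PySem.Dict.empty).keys).flatMap (fun g => (E.map (fun e => (e.2.1, e.1, e.2.2))).filter (fun t => t.1 == g))).Perm
        (E.map (fun e => (e.2.1, e.1, e.2.2))) := by
      refine pv_group_perm _ _ (pv_nodup_keys_pvD1 E) ?_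
      intro t ht
      rcases List.mem_map.mp ht with ⟨e, he, rfl⟩
      rw [pv_keys_pvD1, PySem.Set.mem_ofList]
      exact List.mem_map.mpr ⟨e, he, rfl⟩
    exact (p2.trans p3).trans (p4 ▸ p5)
  · -- strictly increasing under pvKb
    rw [List.pairwise_flatMap]
    refine ⟨fun kv _ => pv_blk_pairwise E hE kv.1, ?_⟩
    refine (pv_sg_pairwise E hE).imp (fun {kv1 kv2} hkg => ?_)
    intro x hx y hy
    rcases List.mem_map.mp hx with ⟨ip1, _, rfl⟩
    rcases List.mem_map.mp hy with ⟨ip2, _, rfl⟩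
    exact pv_lex_prefix hkg

-- ===== VERDICT (by name: the statement is the Claim_ definition above) =====
-- A's two dict-building branches, written as unconditional inserts
theorem pv_d1_body (d : PySem.Dict String Int) (e : Int × String × Int) :
    (if d.contains e.2.1 = false then d.insert e.2.1 e.2.2
     else d.insert e.2.1 (d.getD e.2.1 0 + e.2.2))
      = d.insert e.2.1 (d.getD e.2.1 0 + e.2.2) := by
  by_cases h : d.contains e.2.1 = false
  · rw [if_pos h, PySem.Dict.getD_of_not_contains d 0 h, zero_add]
  · rw [if_neg h]

theorem pv_d2_body (d : PySem.Dict String (List (Int × Int))) (e : Int × String × Int) :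
    (if d.contains e.2.1 = false then d.insert e.2.1 [(e.1, e.2.2)]
     else d.insert e.2.1 (d.getD e.2.1 [] ++ [(e.1, e.2.2)]))
      = d.insert e.2.1 (d.getD e.2.1 [] ++ [(e.1, e.2.2)]) := by
  by_cases h : d.contains e.2.1 = false
  · rw [if_pos h, PySem.Dict.getD_of_not_contains d [] h, List.nil_append]
  · rw [if_neg h]

theorem pv_sg_fst_nodup (E : List (Int × String × Int)) :
    ((pvSG E).map (fun kv => kv.1)).Nodup := by
  have hperm : ((pvSG E).map (fun kv => kv.1)).Perm
      (((pvD1 E PySem.Dict.empty).items).map (fun kv => kv.1)) :=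
    (PySem.List.sorted_perm _ _ _).map _
  refine hperm.symm.nodup ?_
  rw [pv_items_pvD1, List.map_map]
  have : ((fun kv : String × Int => kv.1) ∘ fun g : String => (g, pvTg E g)) = id := rfl
  rw [this, List.map_id]
  exact pv_nodup_keys_pvD1 E

-- ===== VERDICT (by name: the statement is the Claim_ definition above) =====
theorem solution_spec : Claim_equal_solution := by
  intro genres plays _
  unfold Spec_solution
  have hE := pv_enum_pairwise (genres.zip plays) 0
  -- A: split the pair fold, normalise both dict folds, flatten the nested append loops
  have hA : solution genres plays
      = (pvSG (PySem.List.enumerate (genres.zip plays) 0)).flatMap (fun kv =>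
          ((PySem.List.sorted (pvGrp (PySem.List.enumerate (genres.zip plays) 0) kv.1)
              (fun x => x.2) true).take 3).map (fun ip => ip.1)) := by
    rw [solution]
    rw [pv_foldl_pair_split (PySem.List.enumerate (genres.zip plays) 0)
      (fun d1 (e : Int × String × Int) =>
        if d1.contains e.2.1 = false then d1.insert e.2.1 e.2.2
        else d1.insert e.2.1 (d1.getD e.2.1 0 + e.2.2))
      (fun d2 (e : Int × String × Int) =>
        if d2.contains e.2.1 = false then d2.insert e.2.1 [(e.1, e.2.2)]
        else d2.insert e.2.1 (d2.getD e.2.1 [] ++ [(e.1, e.2.2)]))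
      PySem.Dict.empty PySem.Dict.empty]
    rw [List.foldl_ext _ _ _ (fun d e _ => pv_d1_body d e),
        List.foldl_ext _ _ _ (fun d e _ => pv_d2_body d e)]
    simp only [PySem.List.foldl_append_singleton_eq_map, PySem.List.foldl_append_eq_flatMap]
    rw [List.nil_append]
    have hgd : ∀ g : String,
        ((PySem.List.enumerate (genres.zip plays) 0).foldl
            (fun d e => d.insert e.2.1 (d.getD e.2.1 [] ++ [(e.1, e.2.2)])) PySem.Dict.empty).getD g []
          = pvGrp (PySem.List.enumerate (genres.zip plays) 0) g :=
      fun g => pv_getD_pvD2 _ g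
    simp only [hgd]
    rfl
  -- B: split the pair fold and identify the sort key
  have hB : solution_alt genres plays
      = (((PySem.List.sorted ((PySem.List.enumerate (genres.zip plays) 0).map
            (fun e => (e.2.1, e.1, e.2.2)))
            (pvKb (PySem.List.enumerate (genres.zip plays) 0))).foldl pvCStep
          (PySem.Dict.empty, [])).2) := by
    rw [solution_alt]
    rw [pv_foldl_pair_split (PySem.List.enumerate (genres.zip plays) 0)
      (fun d1 (e : Int × String × Int) => d1.insert e.2.1 (d1.getD e.2.1 0 + e.2.2))
      (fun d2 (e : Int × String × Int) =>
        if d2.contains e.2.1 then d2 else d2.insert e.2.1 e.1)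
      PySem.Dict.empty PySem.Dict.empty]
    have hkey : (fun t : String × Int × Int =>
        toLex (-((pvD1 (PySem.List.enumerate (genres.zip plays) 0) PySem.Dict.empty).getD t.1 0),
          toLex ((pvFF (PySem.List.enumerate (genres.zip plays) 0) PySem.Dict.empty).getD t.1 0,
            toLex (-t.2.2, t.2.1))))
        = pvKb (PySem.List.enumerate (genres.zip plays) 0) := by
      funext t
      rw [pvKb, pv_getD_pvD1]
      simp [pvFs, PySem.Dict.getD_empty]
    rw [← hkey]
    rfl
  rw [hA, hB, pv_order _ hE, pv_count_blocks _ _ _ _ (pv_sg_fst_nodup _)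
    (fun kv _ => PySem.Dict.getD_empty kv.1 0), List.nil_append]
  refine List.flatMap_congr ?_
  intro kv _
  rw [pvBlk, ← List.map_take, List.map_map]
  rfl
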